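-- pv_equiv track=rewrite | github.com/tomdif/causal-algebraic-geometry-lean | scripts/count_full_support_pairs_tm.py | count_PP
-- ===== SOURCE A (Python) =====
-- def count_PP(m):
--     """PP(m,m,m) via MacMahon: ∏_{i,j,k=1..m} (i+j+k-1)/(i+j+k-2)."""
--     from fractions import Fraction
--     result = Fraction(1)
--     for i in range(1, m + 1):
--         for j in range(1, m + 1):
--             for k in range(1, m + 1):
--                 result *= Fraction(i + j + k - 1, i + j + k - 2)
--     assert result.denominator == 1
--     return result.numerator
-- ===== SOURCE B (Python) =====
-- def count_PP(m):
--     """PP(m,m,m): group MacMahon's triple product by the anti-diagonal s = i+j.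
--     The inner k-product telescopes to (s+m-1)/(s-1), and the pair (i, j) with
--     i+j = s occurs mult(s) = min(s-1, 2*m+1-s) times, so one loop over s suffices."""
--     from fractions import Fraction
--     result = Fraction(1)
--     for s in range(2, 2 * m + 1):
--         mult = s - 1 if s <= m + 1 else 2 * m + 1 - s
--         result *= Fraction(s + m - 1, s - 1) ** mult
--     return result.numerator
-- ===== Notes on version B (the rewrite author's own statement) =====
-- stated objective: faster
-- what changed: B collapses the triple loop to a single loop over the anti-diagonal s=i+j: the inner k-product telescopes to (s+m-1)/(s-1) and each s is raised to its multiplicity min(s-1, 2m+1-s), giving O(m) fraction operations instead of O(m^3).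
import Mathlib
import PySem

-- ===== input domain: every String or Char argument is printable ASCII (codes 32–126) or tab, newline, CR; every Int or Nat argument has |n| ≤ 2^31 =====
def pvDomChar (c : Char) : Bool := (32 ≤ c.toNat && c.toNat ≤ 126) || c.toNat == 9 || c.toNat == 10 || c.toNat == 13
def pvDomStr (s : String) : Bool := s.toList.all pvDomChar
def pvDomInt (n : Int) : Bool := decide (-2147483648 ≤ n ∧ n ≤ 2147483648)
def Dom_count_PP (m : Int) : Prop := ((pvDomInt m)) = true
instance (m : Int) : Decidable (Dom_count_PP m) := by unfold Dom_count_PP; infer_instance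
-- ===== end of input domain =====

-- B replaces the triple loop by ONE loop over the anti-diagonal s = i+j: the inner
-- k-product telescopes to (s+m-1)/(s-1), raised to the multiplicity of s (faster).

-- ===== PORT A =====
-- Fraction is modelled exactly by ℚ: Fraction(a, b) = Rat.divInt a b, .numerator = .num.
-- The denominators i+j+k-2 ≥ 1, so Fraction never raises; the final assert
-- (denominator == 1) always holds, so A is total and the port returns result.num.
def count_PP (m : Int) : Int :=
  let result : ℚ :=
    (PySem.List.pyRange 1 (m + 1) 1).foldl (fun acc i =>
      (PySem.List.pyRange 1 (m + 1) 1).foldl (fun acc j =>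
        (PySem.List.pyRange 1 (m + 1) 1).foldl (fun acc k =>
          acc * Rat.divInt (i + j + k - 1) (i + j + k - 2)) acc) acc) 1
  result.num

-- ===== PORT B =====
-- Fraction(a, b) = Rat.divInt a b; `frac ** e` with a Python int e ≥ 0 is `q ^ e.toNat`
-- (inside the loop 2 ≤ s ≤ 2m, so the exponent mult is ≥ 1 and .toNat is exact).
def count_PP_alt (m : Int) : Int :=
  let result : ℚ :=
    (PySem.List.pyRange 2 (2 * m + 1) 1).foldl (fun acc s =>
      acc * Rat.divInt (s + m - 1) (s - 1) ^
        (if s ≤ m + 1 then s - 1 else 2 * m + 1 - s).toNat) 1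
  result.num

-- ===== PRECONDITION & SPEC =====
def Spec_count_PP (m : Int) (out : Int) : Prop := out = count_PP_alt m
instance (m : Int) (out : Int) : Decidable (Spec_count_PP m out) := by unfold Spec_count_PP; infer_instance

-- ===== CLAIM (what is proved, stated in full; the proofs are below) =====
def Claim_equal_count_PP : Prop := ∀ (m : Int), Dom_count_PP m → Spec_count_PP m (count_PP m)

-- ===== LEMMAS AND PROOFS =====

-- Telescoping of the inner k-loop: ∏_{k=1}^{n} (x+y+k-1)/(x+y+k-2) = (x+y+n-1)/(x+y-1).
theorem pv_tele (x y : Int) (hs : 2 ≤ x + y) (n : Nat) (acc : ℚ) :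
    (PySem.List.pyRange 1 ((n : Int) + 1) 1).foldl
      (fun a k => a * Rat.divInt (x + y + k - 1) (x + y + k - 2)) acc
      = acc * Rat.divInt (x + y + (n : Int) - 1) (x + y - 1) := by
  induction n generalizing acc with
  | zero =>
      rw [PySem.List.pyRange_one_eq_nil (by norm_num)]
      simp only [List.foldl_nil, Nat.cast_zero, add_zero]
      rw [Rat.divInt_self' (by omega)]
      ring
  | succ n ih =>
      rw [show ((n + 1 : Nat) : Int) + 1 = ((n : Int) + 1) + 1 by push_cast; ring,
        PySem.List.pyRange_one_succ_right (by omega), List.foldl_append, ih]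
      simp only [List.foldl_cons, List.foldl_nil]
      rw [mul_assoc, Rat.divInt_mul_divInt]
      rw [show (x + y + (n:Int) - 1) * (x + y + ((n:Int)+1) - 1)
            = (x + y + ((n:Int)+1) - 1) * (x + y + (n:Int) - 1) by ring,
          show (x + y - 1) * (x + y + ((n:Int)+1) - 2)
            = (x + y - 1) * (x + y + (n:Int) - 1) by ring,
          Rat.divInt_mul_right (by omega),
          show ((n+1:Nat):Int) = (n:Int)+1 by push_cast; ring]

-- A left fold that multiplies in h x is the initial value times the product of the h x.
theorem pv_foldl_mul {α : Type} (h : α → ℚ) (l : List α) (c : ℚ) :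
    l.foldl (fun a x => a * h x) c = c * (l.map h).prod := by
  induction l generalizing c with
  | nil => simp
  | cons x t ih => simp [ih, mul_assoc]

theorem pv_prod_range (n : Nat) (f : Nat → ℚ) :
    ∏ i ∈ Finset.range n, f i = ((List.range n).map f).prod := rfl

-- A multiplicative fold over range(a, b) as a Finset.range product.
theorem pv_fold_py (a b : Int) (h : Int → ℚ) (c : ℚ) :
    (PySem.List.pyRange a b 1).foldl (fun acc x => acc * h x) c
      = c * ∏ k ∈ Finset.range (b - a).toNat, h (a + k) := by
  rw [PySem.List.pyRange_one, List.foldl_map, pv_foldl_mul, pv_prod_range]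

-- Number of pairs (i, j) ∈ [0,n)² on the anti-diagonal i + j = s.
theorem pv_card (n s : Nat) :
    (((Finset.range n) ×ˢ (Finset.range n)).filter (fun p => p.1 + p.2 = s)).card
      = min (s+1) (2*n-1-s) := by
  have himg : ((Finset.range n) ×ˢ (Finset.range n)).filter (fun p => p.1 + p.2 = s)
      = (Finset.Icc (s+1-n) (min s (n-1))).image (fun i => (i, s - i)) := by
    ext p
    simp only [Finset.mem_filter, Finset.mem_product, Finset.mem_range, Finset.mem_image,
      Finset.mem_Icc]
    constructor
    · rintro ⟨⟨h1, h2⟩, h3⟩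
      exact ⟨p.1, by omega, by obtain ⟨a, b⟩ := p; simp at h3 ⊢; omega⟩
    · rintro ⟨i, ⟨h1, h2⟩, rfl⟩
      simp; omega
  rw [himg, Finset.card_image_of_injOn, Nat.card_Icc]
  · omega
  · intro a _ b _ hab
    exact (Prod.mk.injEq ..).mp hab |>.1

-- Grouping a double product over a square by the anti-diagonal s = i + j.
theorem pv_core (n : Nat) (F : Nat → ℚ) :
    (∏ i ∈ Finset.range n, ∏ j ∈ Finset.range n, F (i + j))
      = ∏ s ∈ Finset.range (2*n - 1), F s ^ min (s+1) (2*n-1-s) := by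
  rw [← Finset.prod_product']
  have hmap : ∀ p ∈ (Finset.range n) ×ˢ (Finset.range n),
      (fun p : Nat × Nat => p.1 + p.2) p ∈ Finset.range (2*n-1) := by
    intro p hp
    simp only [Finset.mem_product, Finset.mem_range] at hp ⊢; omega
  have h := Finset.prod_fiberwise_of_maps_to' (g := fun p : Nat × Nat => p.1 + p.2) hmap F
  rw [← h]
  refine Finset.prod_congr rfl fun s hs => ?_
  rw [Finset.prod_const, pv_card n s]

-- The whole rational computation of A equals that of B, for m = n ≥ 0.
theorem pv_rat_eq (n : Nat) :
    (PySem.List.pyRange 1 ((n : Int) + 1) 1).foldl (fun acc i =>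
      (PySem.List.pyRange 1 ((n : Int) + 1) 1).foldl (fun acc j =>
        (PySem.List.pyRange 1 ((n : Int) + 1) 1).foldl (fun acc k =>
          acc * Rat.divInt (i + j + k - 1) (i + j + k - 2)) acc) acc) (1 : ℚ)
    = (PySem.List.pyRange 2 (2 * (n : Int) + 1) 1).foldl (fun acc s =>
        acc * Rat.divInt (s + (n : Int) - 1) (s - 1) ^
          (if s ≤ (n : Int) + 1 then s - 1 else 2 * (n : Int) + 1 - s).toNat) (1 : ℚ) := by
  -- step 1: telescope the inner k-fold of A
  have h1 : (PySem.List.pyRange 1 ((n : Int) + 1) 1).foldl (fun acc i =>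
      (PySem.List.pyRange 1 ((n : Int) + 1) 1).foldl (fun acc j =>
        (PySem.List.pyRange 1 ((n : Int) + 1) 1).foldl (fun acc k =>
          acc * Rat.divInt (i + j + k - 1) (i + j + k - 2)) acc) acc) (1 : ℚ)
      = (PySem.List.pyRange 1 ((n : Int) + 1) 1).foldl (fun acc i =>
          (PySem.List.pyRange 1 ((n : Int) + 1) 1).foldl (fun acc j =>
            acc * Rat.divInt (i + j + (n : Int) - 1) (i + j - 1)) acc) (1 : ℚ) := by
    apply PySem.List.foldl_congr_mem
    intro acc i hi
    apply PySem.List.foldl_congr_mem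
    intro acc j hj
    rw [PySem.List.mem_pyRange_one] at hi hj
    exact pv_tele i j (by omega) n acc
  rw [h1]
  -- step 2: both sides as Finset.range products of F
  have hF : ∀ (i j : Nat),
      Rat.divInt ((1 + (i:Int)) + (1 + (j:Int)) + (n : Int) - 1) ((1 + (i:Int)) + (1 + (j:Int)) - 1)
        = Rat.divInt (((i + j : Nat) : Int) + (n : Int) + 1) (((i + j : Nat) : Int) + 1) := by
    intro i j
    congr 1 <;> push_cast <;> ring
  have hA : (PySem.List.pyRange 1 ((n : Int) + 1) 1).foldl (fun acc i =>
        (PySem.List.pyRange 1 ((n : Int) + 1) 1).foldl (fun acc j =>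
          acc * Rat.divInt (i + j + (n : Int) - 1) (i + j - 1)) acc) (1 : ℚ)
      = ∏ i ∈ Finset.range n, ∏ j ∈ Finset.range n,
          Rat.divInt (((i + j : Nat) : Int) + (n : Int) + 1) (((i + j : Nat) : Int) + 1) := by
    simp only [pv_fold_py]
    rw [show (((n : Int) + 1) - 1).toNat = n by omega, one_mul]
    refine Finset.prod_congr rfl fun i _ => ?_
    refine Finset.prod_congr rfl fun j _ => ?_
    exact hF i j
  rw [hA]
  have hc := pv_core n (fun t => Rat.divInt ((t : Int) + (n : Int) + 1) ((t : Int) + 1))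
  beta_reduce at hc
  rw [hc]
  -- step 3: B's fold as the same product
  rw [pv_fold_py, show (2 * (n : Int) + 1 - 2).toNat = 2 * n - 1 by omega, one_mul]
  refine Finset.prod_congr rfl fun s hs => ?_
  rw [Finset.mem_range] at hs
  congr 1
  · congr 1 <;> omega
  · split_ifs with h <;> omega

-- ===== VERDICT (by name: the statement is the Claim_ definition above) =====
theorem count_PP_spec : Claim_equal_count_PP := by
  intro m _
  unfold Spec_count_PP count_PP count_PP_alt
  by_cases hm : m ≤ 0
  · rw [PySem.List.pyRange_one_eq_nil (show m + 1 ≤ 1 by omega),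
        PySem.List.pyRange_one_eq_nil (show 2 * m + 1 ≤ 2 by omega)]
    simp
  · obtain ⟨n, rfl⟩ : ∃ n : Nat, m = (n : Int) := ⟨m.toNat, (Int.toNat_of_nonneg (by omega)).symm⟩
    rw [pv_rat_eq]
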